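-- pv_equiv track=rewrite | github.com/secure-foundations/trex-usenix25 | tools/evaluating_resym/process_resym_output.py | cleaned_type
-- ===== SOURCE A (Python) =====
-- def cleaned_type(typ, expect_pointer):
--     typ = typ.strip()
--     if typ.startswith("const "):
--         typ = typ.split(" ", 1)[1].strip()
--         return cleaned_type(typ, expect_pointer)
--     if expect_pointer:
--         assert typ.endswith("*"), f"Expected pointer type, got {typ}"
--     if typ.endswith("*"):
--         typ = typ[:-1].strip()
--         return cleaned_type(typ, False)
--     return typ
-- ===== SOURCE B (Python) =====
-- def cleaned_type(typ, expect_pointer):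
--     typ = typ.strip()
--     while typ.startswith("const "):
--         typ = typ[6:].strip()
--     if expect_pointer:
--         assert typ.endswith("*"), f"Expected pointer type, got {typ}"
--     while typ.endswith("*"):
--         typ = typ[:-1].strip()
--     return typ
-- ===== Notes on version B (the rewrite author's own statement) =====
-- stated objective: idiomatic
-- what changed: Replaces A's self-recursion (with split(' ',1) re-parsing and re-stripping on every call) by two flat while-loops: one stripping all 'const ' prefixes by slicing, then one peeling trailing '*'; the assert runs once between the loops, which is sound because const-stripping preserves the last character.
import Mathlib
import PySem

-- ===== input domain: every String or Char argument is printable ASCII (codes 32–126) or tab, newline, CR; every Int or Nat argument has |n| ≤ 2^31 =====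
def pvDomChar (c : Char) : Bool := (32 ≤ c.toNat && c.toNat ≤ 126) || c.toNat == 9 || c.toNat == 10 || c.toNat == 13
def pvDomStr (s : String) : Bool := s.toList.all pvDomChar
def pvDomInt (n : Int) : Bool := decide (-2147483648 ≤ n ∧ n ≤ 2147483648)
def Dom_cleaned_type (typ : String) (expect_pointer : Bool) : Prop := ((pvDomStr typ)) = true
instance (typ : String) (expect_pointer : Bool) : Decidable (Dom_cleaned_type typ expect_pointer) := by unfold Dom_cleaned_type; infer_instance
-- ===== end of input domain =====

-- B replaces A's self-recursion (split(" ",1) + re-strip per call) by two flat while-loops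
-- (strip all "const " prefixes, then peel trailing '*'); the single assert between the loops
-- raises exactly where A's does, and those inputs are outside Pre_.

-- lemmas cited by the ports' termination proofs (must precede the defs)
theorem pv_len_strip_le (l : List Char) : (PySem.Chars.strip l).length ≤ l.length := by
  unfold PySem.Chars.strip PySem.Chars.rstrip PySem.Chars.lstrip
  calc ((List.dropWhile PySem.Chars.isspace (List.dropWhile PySem.Chars.isspace l).reverse).reverse).length
      ≤ (List.dropWhile PySem.Chars.isspace l).length := by
        rw [List.length_reverse]
        exact le_trans (List.length_dropWhile_le _ _) (by rw [List.length_reverse])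
    _ ≤ l.length := List.length_dropWhile_le _ _

theorem pv_go_mzero (sep : List Char) (fuel : Nat) (l cur : List Char) (acc : List (List Char)) :
    PySem.Chars.splitOnMax.go sep fuel 0 l cur acc = ((cur.reverse ++ l) :: acc).reverse := by
  cases fuel with
  | zero => simp [PySem.Chars.splitOnMax.go]
  | succ n => cases l <;> simp [PySem.Chars.splitOnMax.go]

theorem pv_go_step (sep : List Char) (fuel m : Nat) (c : Char) (rest cur : List Char)
    (acc : List (List Char)) (hm : m ≠ 0) (hp : sep.isPrefixOf (c :: rest) = false) :
    PySem.Chars.splitOnMax.go sep (fuel+1) m (c :: rest) cur acc =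
      PySem.Chars.splitOnMax.go sep fuel m rest (c :: cur) acc := by
  simp [PySem.Chars.splitOnMax.go, hm, hp]

theorem pv_go_sep (sep : List Char) (fuel m : Nat) (rest cur : List Char)
    (acc : List (List Char)) (hm : m ≠ 0) (hs : sep ≠ []) :
    PySem.Chars.splitOnMax.go sep (fuel+1) m (sep ++ rest) cur acc =
      PySem.Chars.splitOnMax.go sep fuel (m-1) rest [] (cur.reverse :: acc) := by
  have hp : sep.isPrefixOf (sep ++ rest) = true := by
    rw [List.isPrefixOf_iff_prefix]; exact List.prefix_append _ _
  cases sep with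
  | nil => simp at hs
  | cons a s =>
    simp only [List.cons_append] at hp ⊢
    simp [PySem.Chars.splitOnMax.go, hm, hp]

theorem pv_splitOnMax_const (r : List Char) :
    PySem.Chars.splitOnMax ('c'::'o'::'n'::'s'::'t'::' '::r) [' '] 1 =
      [['c','o','n','s','t'], r] := by
  unfold PySem.Chars.splitOnMax
  rw [if_neg (by norm_num)]
  have hlen : ('c'::'o'::'n'::'s'::'t'::' '::r).length + 1 = (((((((r.length + 1) + 1) + 1) + 1) + 1) + 1) + 1) := by
    simp [List.length_cons]
  rw [hlen]
  rw [pv_go_step _ _ _ _ _ _ _ (by omega) (by simp [List.isPrefixOf])]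
  rw [pv_go_step _ _ _ _ _ _ _ (by omega) (by simp [List.isPrefixOf])]
  rw [pv_go_step _ _ _ _ _ _ _ (by omega) (by simp [List.isPrefixOf])]
  rw [pv_go_step _ _ _ _ _ _ _ (by omega) (by simp [List.isPrefixOf])]
  rw [pv_go_step _ _ _ _ _ _ _ (by omega) (by simp [List.isPrefixOf])]
  rw [show (' '::r) = [' '] ++ r from rfl]
  rw [pv_go_sep _ _ _ _ _ _ (by omega) (by simp)]
  norm_num
  rw [pv_go_mzero]
  rfl

theorem pv_const_toList (t : String) (h : PySem.Str.startswith t "const " = true) :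
    t.toList = 'c'::'o'::'n'::'s'::'t'::' '::(t.toList.drop 6) := by
  rw [PySem.Str.startswith_eq, PySem.Chars.startswith_iff] at h
  obtain ⟨r, hr⟩ := h
  have : "const ".toList = ['c','o','n','s','t',' '] := by decide
  rw [this] at hr
  rw [← hr]; rfl

theorem pv_splitArg_eq (t : String) (h : PySem.Str.startswith t "const " = true) :
    (PySem.List.pyGet? ((PySem.Str.splitMax? t " " 1).getD []) 1).getD "" =
      String.ofList (t.toList.drop 6) := by
  have hsplit : PySem.Str.splitMax? t " " 1 =
      some ["const", String.ofList (t.toList.drop 6)] := by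
    unfold PySem.Str.splitMax? PySem.Chars.splitMax?
    rw [pv_const_toList t h]
    rw [if_neg (by simp)]
    have h6 : ('c'::'o'::'n'::'s'::'t'::' '::(t.toList.drop 6)).drop 6 = t.toList.drop 6 := rfl
    rw [show (" ".toList) = [' '] from rfl, pv_splitOnMax_const (t.toList.drop 6)]
    show some (List.map String.ofList _) = _
    simp only [List.map_cons, List.map_nil]
    rw [show String.ofList ['c','o','n','s','t'] = "const" from by decide, h6]
  rw [hsplit]
  simp [PySem.List.pyGet?, PySem.List.pyIdx?]

-- length of the recursion argument in the "const " branch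
theorem pv_const_arg_len (t : String) (h : PySem.Str.startswith t "const " = true) :
    (PySem.Str.strip ((PySem.List.pyGet? ((PySem.Str.splitMax? t " " 1).getD []) 1).getD "")).toList.length
      < t.toList.length := by
  rw [pv_splitArg_eq t h, PySem.Str.toList_strip, String.toList_ofList]
  have h1 := pv_len_strip_le (t.toList.drop 6)
  have h2 : t.toList.length = (t.toList.drop 6).length + 6 := by
    rw [pv_const_toList t h]; simp
  omega

theorem pv_star_arg_len (t : String) (h : PySem.Str.endswith t "*" = true) :
    (PySem.Str.strip (PySem.Str.slice t none (some (-1)))).toList.length < t.toList.length := by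
  rw [PySem.Str.toList_strip, PySem.Str.toList_slice, PySem.Chars.slice_eq_listSlice,
      PySem.List.slice_to_neg_one]
  have hne : t.toList ≠ [] := by
    rw [PySem.Str.endswith_eq, PySem.Chars.endswith_iff] at h
    intro hnil; rw [hnil] at h; simpa using h.length_le
  have h1 := pv_len_strip_le t.toList.dropLast
  have h2 : t.toList.dropLast.length = t.toList.length - 1 := by simp
  have h3 : 0 < t.toList.length := List.length_pos_iff.mpr hne
  omega

-- ===== PORT A =====
def cleaned_type (typ : String) (expect_pointer : Bool) : String :=
  let t := PySem.Str.strip typ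
  if h1 : PySem.Str.startswith t "const " then
    -- typ.split(" ", 1)[1].strip(); the [1] element exists because t starts with "const "
    cleaned_type (PySem.Str.strip ((PySem.List.pyGet? ((PySem.Str.splitMax? t " " 1).getD []) 1).getD "")) expect_pointer
  else
    -- assert typ.endswith("*") when expect_pointer: Python raises AssertionError there (outside Pre_)
    if h2 : PySem.Str.endswith t "*" then
      cleaned_type (PySem.Str.strip (PySem.Str.slice t none (some (-1)))) false
    else t
termination_by typ.toList.length
decreasing_by
  · exact lt_of_lt_of_le (pv_const_arg_len _ h1) (by rw [PySem.Str.toList_strip]; exact pv_len_strip_le _)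
  · exact lt_of_lt_of_le (pv_star_arg_len _ h2) (by rw [PySem.Str.toList_strip]; exact pv_len_strip_le _)

-- ===== PORT B =====
-- while typ.startswith("const "): typ = typ[6:].strip()
def pvStripConsts (s : String) : String :=
  if h : PySem.Str.startswith s "const " then
    pvStripConsts (PySem.Str.strip (PySem.Str.slice s (some 6) none))
  else s
termination_by s.toList.length
decreasing_by
  have h6 : s.toList.length ≥ 6 := by
    rw [PySem.Str.startswith_eq, PySem.Chars.startswith_iff] at h
    simpa using h.length_le
  rw [PySem.Str.toList_strip, PySem.Str.toList_slice, PySem.Chars.slice_eq_listSlice,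
      PySem.List.slice_from _ (by norm_num)]
  have : (s.toList.drop (Int.toNat 6)).length = s.toList.length - 6 := by simp
  have := pv_len_strip_le (s.toList.drop (Int.toNat 6))
  omega

-- while typ.endswith("*"): typ = typ[:-1].strip()
def pvDropStars (s : String) : String :=
  if h : PySem.Str.endswith s "*" then
    pvDropStars (PySem.Str.strip (PySem.Str.slice s none (some (-1))))
  else s
termination_by s.toList.length
decreasing_by exact pv_star_arg_len _ h

def cleaned_type_alt (typ : String) (expect_pointer : Bool) : String :=
  -- strip, const-loop, then 'assert typ.endswith("*")' when expect_pointer (raises outside Pre_), then star-loop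
  pvDropStars (pvStripConsts (PySem.Str.strip typ))

-- ===== PRECONDITION & SPEC =====
-- Pre_ excludes exactly the inputs on which A's assert fires (AssertionError): expect_pointer set
-- while the stripped type does not end in '*' (const-prefix stripping preserves the last character).
def Pre_cleaned_type (typ : String) (expect_pointer : Bool) : Prop :=
  expect_pointer = true → PySem.Str.endswith (PySem.Str.strip typ) "*" = true
instance (typ : String) (expect_pointer : Bool) : Decidable (Pre_cleaned_type typ expect_pointer) := by
  unfold Pre_cleaned_type; infer_instance
def pvWitness_cleaned_type : String × Bool := ("const const int *", true)

def Spec_cleaned_type (typ : String) (expect_pointer : Bool) (out : String) : Prop := out = cleaned_type_alt typ expect_pointer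
instance (typ : String) (expect_pointer : Bool) (out : String) : Decidable (Spec_cleaned_type typ expect_pointer out) := by unfold Spec_cleaned_type; infer_instance

-- ===== CLAIM (what is proved, stated in full; the proofs are below) =====
def Claim_equal_cleaned_type : Prop := ∀ (typ : String) (expect_pointer : Bool), Dom_cleaned_type typ expect_pointer → Pre_cleaned_type typ expect_pointer → Spec_cleaned_type typ expect_pointer (cleaned_type typ expect_pointer)

-- ===== LEMMAS AND PROOFS =====

theorem pv_dropWhile_prefix (p : Char → Bool) {w x : List Char} (hpre : w <+: x)
    (hx : List.dropWhile p x = x) : List.dropWhile p w = w := by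
  cases w with
  | nil => simp
  | cons a w' =>
    cases x with
    | nil => simpa using hpre.length_le
    | cons b x' =>
      obtain ⟨hab, -⟩ := (List.cons_prefix_cons).mp hpre
      have hpb : p b = false := by
        rw [List.dropWhile_cons] at hx
        by_contra hc
        rw [if_pos (by simpa using hc)] at hx
        have hlen1 := List.length_dropWhile_le p x'
        have hlen2 : (List.dropWhile p x').length = x'.length + 1 := by rw [hx]; simp
        omega
      rw [List.dropWhile_cons, hab, hpb]
      simp

theorem pv_rstrip_prefix (l : List Char) : PySem.Chars.rstrip l <+: l := by
  unfold PySem.Chars.rstrip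
  rw [← List.reverse_suffix]
  simpa using List.dropWhile_suffix _

theorem pv_lstrip_strip (l : List Char) :
    List.dropWhile PySem.Chars.isspace (PySem.Chars.strip l) = PySem.Chars.strip l := by
  unfold PySem.Chars.strip PySem.Chars.lstrip
  exact pv_dropWhile_prefix _ (pv_rstrip_prefix _) (List.dropWhile_idempotent _ _)

theorem pv_rstrip_rstrip (l : List Char) :
    PySem.Chars.rstrip (PySem.Chars.rstrip l) = PySem.Chars.rstrip l := by
  unfold PySem.Chars.rstrip
  simp [List.dropWhile_idempotent]

theorem pv_strip_idem_chars (l : List Char) :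
    PySem.Chars.strip (PySem.Chars.strip l) = PySem.Chars.strip l := by
  have h1 : PySem.Chars.strip (PySem.Chars.strip l)
      = PySem.Chars.rstrip (List.dropWhile PySem.Chars.isspace (PySem.Chars.strip l)) := rfl
  rw [h1, pv_lstrip_strip]
  show PySem.Chars.rstrip (PySem.Chars.rstrip (PySem.Chars.lstrip l)) = _
  rw [pv_rstrip_rstrip]
  rfl

theorem pv_strip_strip (s : String) : PySem.Str.strip (PySem.Str.strip s) = PySem.Str.strip s := by
  rw [← String.toList_inj, PySem.Str.toList_strip, PySem.Str.toList_strip, pv_strip_idem_chars]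

theorem pv_strip_dropLast_prefix (l : List Char) :
    PySem.Chars.strip ((PySem.Chars.strip l).dropLast) <+: PySem.Chars.strip l := by
  have h1 : List.dropWhile PySem.Chars.isspace ((PySem.Chars.strip l).dropLast)
      = (PySem.Chars.strip l).dropLast :=
    pv_dropWhile_prefix _ (List.dropLast_prefix _) (pv_lstrip_strip l)
  have h2 : PySem.Chars.strip ((PySem.Chars.strip l).dropLast)
      = PySem.Chars.rstrip ((PySem.Chars.strip l).dropLast) := by
    show PySem.Chars.rstrip (PySem.Chars.lstrip _) = _
    unfold PySem.Chars.lstrip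
    rw [h1]
  rw [h2]
  exact (pv_rstrip_prefix _).trans (List.dropLast_prefix _)

theorem pv_noconst (l : List Char)
    (h : PySem.Chars.startswith (PySem.Chars.strip l) "const ".toList = false) :
    PySem.Chars.startswith (PySem.Chars.strip ((PySem.Chars.strip l).dropLast)) "const ".toList = false := by
  cases hc : PySem.Chars.startswith (PySem.Chars.strip ((PySem.Chars.strip l).dropLast)) "const ".toList with
  | false => rfl
  | true =>
    exfalso
    rw [PySem.Chars.startswith_iff] at hc
    have := (PySem.Chars.startswith_iff (PySem.Chars.strip l) "const ".toList).mpr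
      (hc.trans (pv_strip_dropLast_prefix l))
    rw [this] at h
    simp at h

theorem pvStripConsts_eq_self (s : String) (h : PySem.Str.startswith s "const " = false) :
    pvStripConsts s = s := by
  rw [pvStripConsts, dif_neg (by rw [h]; simp)]

theorem pvDropStars_eq_self (s : String) (h : PySem.Str.endswith s "*" = false) :
    pvDropStars s = s := by
  rw [pvDropStars, dif_neg (by rw [h]; simp)]

theorem pvStripConsts_step (s : String) (h : PySem.Str.startswith s "const " = true) :
    pvStripConsts s = pvStripConsts (PySem.Str.strip (PySem.Str.slice s (some 6) none)) := by
  conv_lhs => rw [pvStripConsts]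
  rw [dif_pos h]

theorem pvDropStars_step (s : String) (h : PySem.Str.endswith s "*" = true) :
    pvDropStars s = pvDropStars (PySem.Str.strip (PySem.Str.slice s none (some (-1)))) := by
  conv_lhs => rw [pvDropStars]
  rw [dif_pos h]

theorem pv_slice6_eq (t : String) :
    PySem.Str.slice t (some 6) none = String.ofList (t.toList.drop 6) := by
  rw [← String.toList_inj, PySem.Str.toList_slice, PySem.Chars.slice_eq_listSlice,
      PySem.List.slice_from _ (by norm_num), String.toList_ofList]
  rfl

theorem pv_main (n : Nat) : ∀ (typ : String) (ep : Bool), typ.toList.length ≤ n →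
    cleaned_type typ ep = pvDropStars (pvStripConsts (PySem.Str.strip typ)) := by
  induction n using Nat.strong_induction_on with
  | _ n ih =>
  intro typ ep hlen
  rw [cleaned_type]
  have hstl : (PySem.Str.strip typ).toList.length ≤ typ.toList.length := by
    rw [PySem.Str.toList_strip]; exact pv_len_strip_le _
  by_cases h1 : PySem.Str.startswith (PySem.Str.strip typ) "const " = true
  · rw [dif_pos h1]
    have harg := pv_const_arg_len (PySem.Str.strip typ) h1
    rw [ih _ (by omega) _ ep le_rfl]
    rw [pv_strip_strip]
    rw [pvStripConsts_step _ h1, pv_splitArg_eq _ h1, ← pv_slice6_eq]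
  · rw [dif_neg h1]
    rw [Bool.not_eq_true] at h1
    rw [pvStripConsts_eq_self _ h1]
    by_cases h2 : PySem.Str.endswith (PySem.Str.strip typ) "*" = true
    · rw [dif_pos h2]
      have harg := pv_star_arg_len (PySem.Str.strip typ) h2
      rw [ih _ (by omega) _ false le_rfl]
      rw [pv_strip_strip]
      have hnc : PySem.Str.startswith
          (PySem.Str.strip (PySem.Str.slice (PySem.Str.strip typ) none (some (-1)))) "const " = false := by
        rw [PySem.Str.startswith_eq]
        have hA : (PySem.Str.strip (PySem.Str.slice (PySem.Str.strip typ) none (some (-1)))).toList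
            = PySem.Chars.strip ((PySem.Chars.strip typ.toList).dropLast) := by
          rw [PySem.Str.toList_strip, PySem.Str.toList_slice, PySem.Chars.slice_eq_listSlice,
              PySem.List.slice_to_neg_one, PySem.Str.toList_strip]
        rw [hA]
        exact pv_noconst typ.toList (by rw [PySem.Str.startswith_eq, PySem.Str.toList_strip] at h1; exact h1)
      rw [pvStripConsts_eq_self _ hnc]
      rw [pvDropStars_step _ h2]
    · rw [dif_neg h2]
      rw [Bool.not_eq_true] at h2
      rw [pvDropStars_eq_self _ h2]

-- ===== VERDICT (by name: the statement is the Claim_ definition above) =====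
theorem cleaned_type_spec : Claim_equal_cleaned_type := by
  intro typ ep _ _
  unfold Spec_cleaned_type cleaned_type_alt
  exact pv_main typ.toList.length typ ep le_rfl
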